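-- pv_equiv track=rewrite | github.com/marsiandeployer/human-in-the-loop-review | docs/keywords/libs-analyzer-2026-05-01.py | article_ideas
-- ===== SOURCE A (Python) =====
-- def article_ideas(slug, display, top_kw):
--     """Suggest article angles from the long-tail."""
--     ideas = []
--     name_l = display.lower()
--     # Heuristic patterns: look for intent signals
--     pat_groups = [
--         # High-intent first — drives most traffic + buyer intent
--         (" alternative", f"{display} alternatives — open-source landscape"),
--         (" vs ", f"{display} vs X — when to pick which"),
--         (" install", f"How to install {display} — full step-by-step guide"),
--         (" docker", f"How to deploy {display} with Docker (production-ready setup)"),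
--         (" hosting", f"{display} hosting — self-host vs managed (cost & ops)"),
--         (" pricing", f"{display} pricing — free, cloud, enterprise compared"),
--         (" tutorial", f"{display} for beginners — complete tutorial"),
--         (" review", f"Honest {display} review — pros, cons, when to pick it"),
--         (" plugin", f"Top {display} plugins/extensions reviewed"),
--         (" theme", f"{display} theming guide — customize the UI"),
--         (" api", f"{display} API tutorial — first integration in 30 min"),
--         (" demo", f"{display} live demo — try before you self-host"),
--         (" config", f"Production {display} config — security & performance"),
--         (" not working", f"Common {display} errors and how to fix them"),
--         (" error", f"Common {display} errors and how to fix them"),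
--         (" backup", f"Backup & restore strategy for {display}"),
--         (" migration", f"Migrate to {display} — from SaaS to self-hosted"),
--         (" upgrade", f"Upgrade {display} safely — version-to-version notes"),
--         (" github", f"Reading the {display} source — what to know before forking"),
--     ]
--     # Iterate patterns by priority; pick the highest-volume keyword that triggers each.
--     seen = set()
--     for marker, idea in pat_groups:
--         for kw, vol in top_kw:
--             if marker in kw.lower() and idea not in seen:
--                 ideas.append((idea, kw, vol))
--                 seen.add(idea)
--                 break
--         if len(ideas) >= 8:
--             break
--     # Always-on cornerstone
--     cornerstone = f"What is {display}? — the complete guide for self-hosters"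
--     ideas.insert(0, (cornerstone, "(cornerstone)", 0))
--     return ideas
-- ===== SOURCE B (Python) =====
-- def article_ideas(slug, display, top_kw):
--     """Suggest article angles from the long-tail (index-based rewrite)."""
--     pat_groups = [
--         (" alternative", f"{display} alternatives — open-source landscape"),
--         (" vs ", f"{display} vs X — when to pick which"),
--         (" install", f"How to install {display} — full step-by-step guide"),
--         (" docker", f"How to deploy {display} with Docker (production-ready setup)"),
--         (" hosting", f"{display} hosting — self-host vs managed (cost & ops)"),
--         (" pricing", f"{display} pricing — free, cloud, enterprise compared"),
--         (" tutorial", f"{display} for beginners — complete tutorial"),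
--         (" review", f"Honest {display} review — pros, cons, when to pick it"),
--         (" plugin", f"Top {display} plugins/extensions reviewed"),
--         (" theme", f"{display} theming guide — customize the UI"),
--         (" api", f"{display} API tutorial — first integration in 30 min"),
--         (" demo", f"{display} live demo — try before you self-host"),
--         (" config", f"Production {display} config — security & performance"),
--         (" not working", f"Common {display} errors and how to fix them"),
--         (" error", f"Common {display} errors and how to fix them"),
--         (" backup", f"Backup & restore strategy for {display}"),
--         (" migration", f"Migrate to {display} — from SaaS to self-hosted"),
--         (" upgrade", f"Upgrade {display} safely — version-to-version notes"),
--         (" github", f"Reading the {display} source — what to know before forking"),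
--     ]
--     # One pass over top_kw: remember, for each marker, the FIRST keyword
--     # (in input order) whose lowercase form contains it.
--     index = {}
--     for kw, vol in top_kw:
--         low = kw.lower()
--         for marker, _idea in pat_groups:
--             if marker not in index and marker in low:
--                 index[marker] = (kw, vol)
--     ideas = []
--     seen = set()
--     for marker, idea in pat_groups:
--         if marker in index and idea not in seen:
--             kw, vol = index[marker]
--             ideas.append((idea, kw, vol))
--             seen.add(idea)
--         if len(ideas) >= 8:
--             break
--     cornerstone = f"What is {display}? — the complete guide for self-hosters"
--     return [(cornerstone, "(cornerstone)", 0)] + ideas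
-- ===== Notes on version B (the rewrite author's own statement) =====
-- stated objective: alternative
-- what changed: Replaces A's per-marker inner scan over top_kw with a single pass over top_kw that builds a marker->first-matching-keyword dict index, then emits ideas by dict lookup in priority order.
import Mathlib
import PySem

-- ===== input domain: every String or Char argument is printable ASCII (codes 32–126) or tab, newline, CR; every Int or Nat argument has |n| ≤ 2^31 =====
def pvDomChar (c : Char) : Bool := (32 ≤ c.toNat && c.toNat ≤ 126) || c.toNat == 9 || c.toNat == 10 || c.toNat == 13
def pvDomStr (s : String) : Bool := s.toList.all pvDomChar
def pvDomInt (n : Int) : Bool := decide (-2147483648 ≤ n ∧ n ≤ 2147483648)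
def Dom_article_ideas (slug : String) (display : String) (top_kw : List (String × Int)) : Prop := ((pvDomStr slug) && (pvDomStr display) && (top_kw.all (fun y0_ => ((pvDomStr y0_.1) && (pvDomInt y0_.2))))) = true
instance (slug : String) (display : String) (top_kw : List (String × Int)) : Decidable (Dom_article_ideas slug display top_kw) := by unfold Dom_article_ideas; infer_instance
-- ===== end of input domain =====

-- B replaces A's per-marker inner scan of top_kw with one indexing pass over top_kw
-- (a dict mapping each marker to the first matching keyword) followed by lookups: an
-- alternative decomposition of the same cost; equivalence is proved on all of Dom.

-- the pat_groups literal table, shared data of both ports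
def pvPatGroups (display : String) : List (String × String) :=
  [(" alternative", display ++ " alternatives — open-source landscape"),
   (" vs ", display ++ " vs X — when to pick which"),
   (" install", "How to install " ++ display ++ " — full step-by-step guide"),
   (" docker", "How to deploy " ++ display ++ " with Docker (production-ready setup)"),
   (" hosting", display ++ " hosting — self-host vs managed (cost & ops)"),
   (" pricing", display ++ " pricing — free, cloud, enterprise compared"),
   (" tutorial", display ++ " for beginners — complete tutorial"),
   (" review", "Honest " ++ display ++ " review — pros, cons, when to pick it"),
   (" plugin", "Top " ++ display ++ " plugins/extensions reviewed"),
   (" theme", display ++ " theming guide — customize the UI"),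
   (" api", display ++ " API tutorial — first integration in 30 min"),
   (" demo", display ++ " live demo — try before you self-host"),
   (" config", "Production " ++ display ++ " config — security & performance"),
   (" not working", "Common " ++ display ++ " errors and how to fix them"),
   (" error", "Common " ++ display ++ " errors and how to fix them"),
   (" backup", "Backup & restore strategy for " ++ display),
   (" migration", "Migrate to " ++ display ++ " — from SaaS to self-hosted"),
   (" upgrade", "Upgrade " ++ display ++ " safely — version-to-version notes"),
   (" github", "Reading the " ++ display ++ " source — what to know before forking")]

-- ===== PORT A =====
-- inner 'for kw, vol in top_kw: … break'
def pvAInner (marker idea : String) (ideas : List (String × String × Int))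
    (seen : PySem.Set String) : List (String × Int) → List (String × String × Int) × PySem.Set String
  | [] => (ideas, seen)
  | (kw, vol) :: rest =>
      if PySem.Str.isIn marker (PySem.Str.lower kw) && !(PySem.Set.contains seen idea) then
        (ideas ++ [(idea, kw, vol)], PySem.Set.add seen idea)
      else pvAInner marker idea ideas seen rest

-- outer 'for marker, idea in pat_groups: … if len(ideas) >= 8: break'
def pvALoop (top_kw : List (String × Int)) :
    List (String × String) → List (String × String × Int) → PySem.Set String → List (String × String × Int)
  | [], ideas, _ => ideas
  | (marker, idea) :: rest, ideas, seen =>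
      let s := pvAInner marker idea ideas seen top_kw
      if 8 ≤ s.1.length then s.1 else pvALoop top_kw rest s.1 s.2

def article_ideas (slug : String) (display : String) (top_kw : List (String × Int)) : List (String × String × Int) :=
  let _name_l := PySem.Str.lower display  -- name_l is computed but unused in A
  let ideas := pvALoop top_kw (pvPatGroups display) [] PySem.Set.empty
  let cornerstone := "What is " ++ display ++ "? — the complete guide for self-hosters"
  (cornerstone, "(cornerstone)", (0 : Int)) :: ideas

-- ===== PORT B =====
-- one pass over top_kw building the marker -> first matching (kw, vol) index
def pvBStep (pg : List (String × String)) (idx : PySem.Dict String (String × Int))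
    (p : String × Int) : PySem.Dict String (String × Int) :=
  pg.foldl (fun idx m =>
      if !(idx.contains m.1) && PySem.Str.isIn m.1 (PySem.Str.lower p.1) then idx.insert m.1 p
      else idx)
    idx

def pvBIndex (pg : List (String × String)) (top_kw : List (String × Int)) :
    PySem.Dict String (String × Int) :=
  top_kw.foldl (pvBStep pg) PySem.Dict.empty

-- 'for marker, idea in pat_groups: if marker in index and idea not in seen: …'
def pvBLoop (idx : PySem.Dict String (String × Int)) :
    List (String × String) → List (String × String × Int) → PySem.Set String → List (String × String × Int)
  | [], ideas, _ => ideas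
  | (marker, idea) :: rest, ideas, seen =>
      let s :=
        if idx.contains marker && !(PySem.Set.contains seen idea) then
          (ideas ++ [(idea, idx.getD marker ("", 0))], PySem.Set.add seen idea)
        else (ideas, seen)
      if 8 ≤ s.1.length then s.1 else pvBLoop idx rest s.1 s.2

def article_ideas_alt (slug : String) (display : String) (top_kw : List (String × Int)) : List (String × String × Int) :=
  let pg := pvPatGroups display
  let idx := pvBIndex pg top_kw
  let ideas := pvBLoop idx pg [] PySem.Set.empty
  ("What is " ++ display ++ "? — the complete guide for self-hosters", "(cornerstone)", (0 : Int)) :: ideas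

-- ===== PRECONDITION & SPEC =====
def Spec_article_ideas (slug : String) (display : String) (top_kw : List (String × Int)) (out : List (String × String × Int)) : Prop := out = article_ideas_alt slug display top_kw
instance (slug : String) (display : String) (top_kw : List (String × Int)) (out : List (String × String × Int)) : Decidable (Spec_article_ideas slug display top_kw out) := by unfold Spec_article_ideas; infer_instance

-- ===== CLAIM (what is proved, stated in full; the proofs are below) =====
def Claim_equal_article_ideas : Prop := ∀ (slug : String) (display : String) (top_kw : List (String × Int)), Dom_article_ideas slug display top_kw → Spec_article_ideas slug display top_kw (article_ideas slug display top_kw)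


-- ===== LEMMAS AND PROOFS =====

-- the predicate "marker occurs in kw.lower()" on a (kw, vol) pair
def pvHit (marker : String) (p : String × Int) : Bool :=
  PySem.Str.isIn marker (PySem.Str.lower p.1)

-- A's inner scan does nothing when the idea was already emitted
lemma pvAInner_of_seen (marker idea : String) (ideas : List (String × String × Int))
    (seen : PySem.Set String) (hc : PySem.Set.contains seen idea = true) :
    ∀ l, pvAInner marker idea ideas seen l = (ideas, seen) := by
  intro l
  induction l with
  | nil => rfl
  | cons q rest ih =>
      obtain ⟨kw, vol⟩ := q
      simp only [pvAInner]
      rw [hc, Bool.not_true, Bool.and_false, if_neg Bool.false_ne_true]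
      exact ih

-- with the idea fresh and no keyword matching, A's inner scan does nothing
lemma pvAInner_none (marker idea : String) (ideas : List (String × String × Int))
    (seen : PySem.Set String) :
    ∀ l, l.find? (pvHit marker) = none → pvAInner marker idea ideas seen l = (ideas, seen) := by
  intro l
  induction l with
  | nil => intro _; rfl
  | cons q rest ih =>
      intro hf
      obtain ⟨kw, vol⟩ := q
      by_cases hm : pvHit marker (kw, vol) = true
      · rw [List.find?_cons_of_pos hm] at hf; exact absurd hf (by simp)
      · rw [List.find?_cons_of_neg hm] at hf
        simp only [pvAInner]
        rw [show PySem.Str.isIn marker (PySem.Str.lower kw) = false from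
              Bool.eq_false_iff.mpr hm,
            Bool.false_and, if_neg Bool.false_ne_true]
        exact ih hf

-- with the idea fresh, A's inner scan appends the FIRST matching keyword
lemma pvAInner_some (marker idea : String) (ideas : List (String × String × Int))
    (seen : PySem.Set String) (hc : PySem.Set.contains seen idea = false) :
    ∀ l v, l.find? (pvHit marker) = some v →
      pvAInner marker idea ideas seen l = (ideas ++ [(idea, v)], PySem.Set.add seen idea) := by
  intro l
  induction l with
  | nil => intro v hf; exact absurd hf (by simp)
  | cons q rest ih =>
      intro v hf
      obtain ⟨kw, vol⟩ := q
      by_cases hm : pvHit marker (kw, vol) = true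
      · rw [List.find?_cons_of_pos hm] at hf
        obtain rfl : ((kw, vol) : String × Int) = v := by injection hf
        simp only [pvAInner]
        rw [show PySem.Str.isIn marker (PySem.Str.lower kw) = true from hm, hc]
        rfl
      · rw [List.find?_cons_of_neg hm] at hf
        simp only [pvAInner]
        rw [show PySem.Str.isIn marker (PySem.Str.lower kw) = false from
              Bool.eq_false_iff.mpr hm,
            Bool.false_and, if_neg Bool.false_ne_true]
        exact ih v hf

-- an already-indexed marker is never overwritten by one keyword's marker pass
lemma pvBStep_some (marker : String) (p : String × Int) (v : String × Int) :
    ∀ (pg : List (String × String)) (idx : PySem.Dict String (String × Int)),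
      idx.get? marker = some v → (pvBStep pg idx p).get? marker = some v := by
  intro pg
  induction pg with
  | nil => intro idx h; exact h
  | cons m rest ih =>
      intro idx h
      show (pvBStep rest
        (if !(idx.contains m.1) && PySem.Str.isIn m.1 (PySem.Str.lower p.1) then idx.insert m.1 p else idx) p).get? marker = some v
      by_cases hstep : (!(idx.contains m.1) && PySem.Str.isIn m.1 (PySem.Str.lower p.1)) = true
      · rw [if_pos hstep]
        have hnc : idx.contains m.1 = false := by
          simp only [Bool.and_eq_true, Bool.not_eq_true'] at hstep
          exact hstep.1
        have hne : marker ≠ m.1 := by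
          intro heq
          have hct : idx.contains m.1 = true := by
            rw [PySem.Dict.contains_eq_isSome_get?, ← heq, h]; rfl
          rw [hct] at hnc
          exact absurd hnc (by decide)
        refine ih _ ?_
        rw [PySem.Dict.get?_insert, if_neg hne]
        exact h
      · rw [if_neg hstep]; exact ih _ h

-- one keyword's marker pass, for a marker not yet indexed
lemma pvBStep_none (marker : String) (p : String × Int) :
    ∀ (pg : List (String × String)) (idx : PySem.Dict String (String × Int)),
      idx.get? marker = none →
      (pvBStep pg idx p).get? marker =
        if marker ∈ pg.map Prod.fst ∧ pvHit marker p = true then some p else none := by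
  intro pg
  induction pg with
  | nil => intro idx h; simpa using h
  | cons m rest ih =>
      intro idx h
      show (pvBStep rest
        (if !(idx.contains m.1) && PySem.Str.isIn m.1 (PySem.Str.lower p.1) then idx.insert m.1 p else idx) p).get? marker = _
      by_cases hstep : (!(idx.contains m.1) && PySem.Str.isIn m.1 (PySem.Str.lower p.1)) = true
      · rw [if_pos hstep]
        have hin : PySem.Str.isIn m.1 (PySem.Str.lower p.1) = true := by
          simp only [Bool.and_eq_true, Bool.not_eq_true'] at hstep
          exact hstep.2
        by_cases heq : marker = m.1
        · rw [pvBStep_some marker p p rest _ (by rw [PySem.Dict.get?_insert, if_pos heq])]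
          have hhit : pvHit marker p = true := by rw [pvHit, heq]; exact hin
          rw [if_pos ⟨by rw [List.map_cons, List.mem_cons]; exact Or.inl heq, hhit⟩]
        · rw [ih _ (by rw [PySem.Dict.get?_insert, if_neg heq]; exact h)]
          refine if_congr ?_ rfl rfl
          rw [List.map_cons, List.mem_cons]
          tauto
      · rw [if_neg hstep]
        rw [ih _ h]
        by_cases heq : marker = m.1
        · have hcf : idx.contains m.1 = false := by
            rw [PySem.Dict.contains_eq_isSome_get?, ← heq, h]; rfl
          have hisin : PySem.Str.isIn m.1 (PySem.Str.lower p.1) = false := by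
            rcases Bool.eq_false_or_eq_true (PySem.Str.isIn m.1 (PySem.Str.lower p.1)) with h' | h'
            · exact absurd (by rw [hcf, h']; rfl) hstep
            · exact h'
          have hhit : pvHit marker p = false := by rw [pvHit, heq]; exact hisin
          simp [hhit]
        · refine if_congr ?_ rfl rfl
          rw [List.map_cons, List.mem_cons]
          tauto

-- across the whole keyword pass an indexed marker keeps its value
lemma pvOuter_some (pg : List (String × String)) (marker : String) (v : String × Int) :
    ∀ (tk : List (String × Int)) (idx : PySem.Dict String (String × Int)),
      idx.get? marker = some v → (tk.foldl (pvBStep pg) idx).get? marker = some v := by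
  intro tk
  induction tk with
  | nil => intro idx h; exact h
  | cons p rest ih =>
      intro idx h
      show (rest.foldl (pvBStep pg) (pvBStep pg idx p)).get? marker = some v
      exact ih _ (pvBStep_some marker p v pg idx h)

-- B's index holds, for each marker of the table, A's first matching keyword
lemma pvBIndex_find (pg : List (String × String)) (marker : String)
    (hm : marker ∈ pg.map Prod.fst) :
    ∀ (tk : List (String × Int)) (idx : PySem.Dict String (String × Int)),
      idx.get? marker = none →
      (tk.foldl (pvBStep pg) idx).get? marker = tk.find? (pvHit marker) := by
  intro tk
  induction tk with
  | nil => intro idx h; simpa using h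
  | cons p rest ih =>
      intro idx h
      show (rest.foldl (pvBStep pg) (pvBStep pg idx p)).get? marker = _
      by_cases hhit : pvHit marker p = true
      · rw [pvOuter_some pg marker p rest _
              (by rw [pvBStep_none marker p pg idx h, if_pos ⟨hm, hhit⟩]),
            List.find?_cons_of_pos hhit]
      · rw [ih _ (by rw [pvBStep_none marker p pg idx h]; simp [hhit]),
            List.find?_cons_of_neg hhit]

lemma pvBIndex_get? (pg : List (String × String)) (top_kw : List (String × Int))
    (marker : String) (hm : marker ∈ pg.map Prod.fst) :
    (pvBIndex pg top_kw).get? marker = top_kw.find? (pvHit marker) :=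
  pvBIndex_find pg marker hm top_kw PySem.Dict.empty (by simp)

-- the two priority loops agree marker by marker
lemma pvLoop_eq (pg : List (String × String)) (top_kw : List (String × Int)) :
    ∀ (pats : List (String × String)) (ideas : List (String × String × Int)) (seen : PySem.Set String),
    (∀ q ∈ pats, q.1 ∈ pg.map Prod.fst) →
    pvALoop top_kw pats ideas seen = pvBLoop (pvBIndex pg top_kw) pats ideas seen := by
  intro pats
  induction pats with
  | nil => intro ideas seen _; rfl
  | cons q rest ih =>
      intro ideas seen hsub
      obtain ⟨marker, idea⟩ := q
      have hm : marker ∈ pg.map Prod.fst := hsub (marker, idea) (by simp)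
      have hrest : ∀ q ∈ rest, q.1 ∈ pg.map Prod.fst := fun q hq => hsub q (by simp [hq])
      have hget := pvBIndex_get? pg top_kw marker hm
      have hstep : pvAInner marker idea ideas seen top_kw =
          (if (pvBIndex pg top_kw).contains marker && !(PySem.Set.contains seen idea) then
            (ideas ++ [(idea, (pvBIndex pg top_kw).getD marker ("", 0))], PySem.Set.add seen idea)
          else (ideas, seen)) := by
        by_cases hseen : PySem.Set.contains seen idea = true
        · rw [pvAInner_of_seen marker idea ideas seen hseen top_kw, hseen,
              Bool.not_true, Bool.and_false, if_neg Bool.false_ne_true]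
        · have hc : PySem.Set.contains seen idea = false := Bool.eq_false_iff.mpr hseen
          cases hf : top_kw.find? (pvHit marker) with
          | none =>
              have hcont : (pvBIndex pg top_kw).contains marker = false := by
                rw [PySem.Dict.contains_eq_isSome_get?, hget, hf]; rfl
              rw [pvAInner_none marker idea ideas seen top_kw hf, hcont,
                  Bool.false_and, if_neg Bool.false_ne_true]
          | some v =>
              have hcont : (pvBIndex pg top_kw).contains marker = true := by
                rw [PySem.Dict.contains_eq_isSome_get?, hget, hf]; rfl
              have hgetD : (pvBIndex pg top_kw).getD marker ("", 0) = v := by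
                rw [PySem.Dict.getD_eq_get?_getD, hget, hf]; rfl
              rw [pvAInner_some marker idea ideas seen hc top_kw v hf, hcont, hc,
                  Bool.not_false, Bool.and_true, if_pos rfl, hgetD]
      simp only [pvALoop, pvBLoop]
      rw [hstep]
      by_cases h8 : 8 ≤ (if (pvBIndex pg top_kw).contains marker && !(PySem.Set.contains seen idea) then
            (ideas ++ [(idea, (pvBIndex pg top_kw).getD marker ("", 0))], PySem.Set.add seen idea)
          else (ideas, seen)).1.length
      · rw [if_pos h8, if_pos h8]
      · rw [if_neg h8, if_neg h8]
        exact ih _ _ hrest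

-- ===== VERDICT (by name: the statement is the Claim_ definition above) =====
theorem article_ideas_spec : Claim_equal_article_ideas := by
  intro slug display top_kw _
  unfold Spec_article_ideas
  simp only [article_ideas, article_ideas_alt]
  rw [pvLoop_eq (pvPatGroups display) top_kw (pvPatGroups display) [] PySem.Set.empty
      (fun q hq => List.mem_map_of_mem hq)]
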